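-- pv_equiv track=rewrite | github.com/nadja1908/Diplomski | scripts/postgres/generate_11_academic_demo_seed.py | pick_subjects_for_ects
-- ===== SOURCE A (Python) =====
-- def pick_subjects_for_ects(pool: list[dict], min_sum: int) -> list[dict]:
--     """Grčki: sortiraj po ESPB opadajuće, uzmi dok suma < min_sum."""
--     pool = [p for p in pool]
--     pool.sort(key=lambda x: -x["espb"])
--     out: list[dict] = []
--     s = 0
--     for p in pool:
--         if s >= min_sum:
--             break
--         out.append(p)
--         s += p["espb"]
--     if s < min_sum:
--         raise RuntimeError(f"Nedovoljno ESPB u pool-u: {s} < {min_sum}, predmeta={len(pool)}")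
--     return out
-- ===== SOURCE B (Python) =====
-- def pick_subjects_for_ects(pool: list[dict], min_sum: int) -> list[dict]:
--     """Sort descending by ESPB, build the prefix-sum table, cut at the first prefix >= min_sum."""
--     srt = sorted(pool, key=lambda x: -x["espb"])
--     prefix = [0]
--     s = 0
--     for p in srt:
--         s += p["espb"]
--         prefix.append(s)
--     k = next((i for i, c in enumerate(prefix) if c >= min_sum), None)
--     if k is None:
--         raise RuntimeError(f"Nedovoljno ESPB u pool-u: {s} < {min_sum}, predmeta={len(srt)}")
--     return srt[:k]
-- ===== Notes on version B (the rewrite author's own statement) =====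
-- stated objective: alternative
-- what changed: Replaces A's incremental append-while-below-threshold loop by building the full prefix-sum table of the descending-sorted pool and cutting it at the first prefix that reaches min_sum (srt[:k]).
-- outside the precondition, e.g. on pick_subjects_for_ects([{'espb': 1}], 5): A raises RuntimeError, B raises RuntimeError; on pick_subjects_for_ects([{'id': 1}], 0): A raises KeyError, B raises KeyError
import Mathlib
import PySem

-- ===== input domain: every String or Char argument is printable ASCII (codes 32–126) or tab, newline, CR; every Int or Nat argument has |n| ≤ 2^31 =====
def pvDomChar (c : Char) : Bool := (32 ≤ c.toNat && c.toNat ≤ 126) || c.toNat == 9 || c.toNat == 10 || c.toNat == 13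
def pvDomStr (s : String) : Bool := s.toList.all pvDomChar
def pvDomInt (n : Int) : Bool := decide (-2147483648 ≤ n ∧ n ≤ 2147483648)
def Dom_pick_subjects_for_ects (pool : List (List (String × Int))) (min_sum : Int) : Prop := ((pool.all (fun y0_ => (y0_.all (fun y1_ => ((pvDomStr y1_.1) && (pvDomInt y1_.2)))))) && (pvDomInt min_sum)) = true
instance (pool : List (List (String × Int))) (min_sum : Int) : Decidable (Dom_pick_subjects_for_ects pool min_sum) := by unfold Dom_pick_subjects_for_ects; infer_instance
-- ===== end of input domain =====

-- B replaces A's incremental append-while loop by a prefix-sum table and a single cutoff search (alternative decomposition, same cost).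
-- A raises RuntimeError when the total ESPB falls short of min_sum, and KeyError on a dict without "espb": both are excluded by Pre_.

-- shared helper: p["espb"] — first match in the association list (KeyError case, excluded by Pre_, defaults to 0)
def pvEspb : List (String × Int) → Int
  | [] => 0
  | (k, v) :: t => if k = "espb" then v else pvEspb t

-- ===== PORT A =====
-- the for-loop with break: take while the running sum is below min_sum
def pvPickLoopA (m : Int) : List (List (String × Int)) → Int → List (List (String × Int))
  | [], _ => []
  | p :: t, s => if s ≥ m then [] else p :: pvPickLoopA m t (s + pvEspb p)

def pick_subjects_for_ects (pool : List (List (String × Int))) (min_sum : Int) : List (List (String × Int)) :=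
  let srt := PySem.List.sorted pool (fun x => -pvEspb x) false
  -- the trailing 'if s < min_sum: raise RuntimeError' is the region excluded by Pre_
  pvPickLoopA min_sum srt 0

-- ===== PORT B =====
def pick_subjects_for_ects_alt (pool : List (List (String × Int))) (min_sum : Int) : List (List (String × Int)) :=
  let srt := PySem.List.sorted pool (fun x => -pvEspb x) false
  -- prefix = [0]; s = 0; for p in srt: s += p["espb"]; prefix.append(s)
  let pr := srt.foldl (fun (st : List Int × Int) p => (st.1 ++ [st.2 + pvEspb p], st.2 + pvEspb p)) ([0], 0)
  -- k = next((i for i, c in enumerate(prefix) if c >= min_sum), None)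
  match (PySem.List.enumerate pr.1 0).find? (fun ic => decide (min_sum ≤ ic.2)) with
  | some ic => PySem.List.slice srt none (some ic.1)   -- srt[:k]
  | none => []   -- Python raises RuntimeError here; excluded by Pre_

-- ===== PRECONDITION & SPEC =====
-- Pre_ excludes exactly A's raises: a pool dict lacking the "espb" key (KeyError in the sort key)
-- and a total ESPB below min_sum (the explicit RuntimeError).
def Pre_pick_subjects_for_ects (pool : List (List (String × Int))) (min_sum : Int) : Prop :=
  (∀ p ∈ pool, "espb" ∈ p.map Prod.fst) ∧ min_sum ≤ (pool.map (fun p => (List.lookup "espb" p).getD 0)).sum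
instance (pool : List (List (String × Int))) (min_sum : Int) : Decidable (Pre_pick_subjects_for_ects pool min_sum) := by unfold Pre_pick_subjects_for_ects; infer_instance

def pvWitness_pick_subjects_for_ects : (List (List (String × Int))) × Int := ([[("espb", 3)], [("espb", 5)]], 4)

def Spec_pick_subjects_for_ects (pool : List (List (String × Int))) (min_sum : Int) (out : List (List (String × Int))) : Prop := out = pick_subjects_for_ects_alt pool min_sum
instance (pool : List (List (String × Int))) (min_sum : Int) (out : List (List (String × Int))) : Decidable (Spec_pick_subjects_for_ects pool min_sum out) := by unfold Spec_pick_subjects_for_ects; infer_instance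

-- ===== CLAIM (what is proved, stated in full; the proofs are below) =====
def Claim_equal_pick_subjects_for_ects : Prop := ∀ (pool : List (List (String × Int))) (min_sum : Int), Dom_pick_subjects_for_ects pool min_sum → Pre_pick_subjects_for_ects pool min_sum → Spec_pick_subjects_for_ects pool min_sum (pick_subjects_for_ects pool min_sum)

-- ===== LEMMAS AND PROOFS =====

-- pvEspb is exactly the library first-match lookup (with default 0) used by Pre_
theorem pvEspb_eq_lookup (p : List (String × Int)) : pvEspb p = (List.lookup "espb" p).getD 0 := by
  induction p with
  | nil => rfl
  | cons kv t ih =>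
      obtain ⟨k, v⟩ := kv
      by_cases hk : k = "espb"
      · subst hk; simp [pvEspb, List.lookup]
      · have hb : ("espb" == k) = false := by simp [Ne.symm hk]
        simp [pvEspb, List.lookup, hk, hb, ih]

-- running prefix sums of pvEspb starting after s
def pvScan (s : Int) : List (List (String × Int)) → List Int
  | [] => []
  | p :: t => (s + pvEspb p) :: pvScan (s + pvEspb p) t

theorem pvFoldl_pr (L : List (List (String × Int))) : ∀ (acc : List Int) (s : Int),
    (L.foldl (fun (st : List Int × Int) p => (st.1 ++ [st.2 + pvEspb p], st.2 + pvEspb p)) (acc, s)).1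
      = acc ++ pvScan s L := by
  induction L with
  | nil => intro acc s; simp [pvScan]
  | cons p t ih =>
      intro acc s
      simp only [List.foldl_cons, pvScan]
      rw [ih]
      simp

theorem pvLoopA_take (m : Int) : ∀ (L : List (List (String × Int))) (s : Int),
    pvPickLoopA m L s = L.take (pvPickLoopA m L s).length := by
  intro L
  induction L with
  | nil => intro s; simp [pvPickLoopA]
  | cons p t ih =>
      intro s
      by_cases h : s ≥ m
      · simp [pvPickLoopA, h]
      · simp only [pvPickLoopA, if_neg h, List.length_cons, List.take_succ_cons]
        exact congrArg (p :: ·) (ih _)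

theorem pvFind_scan (m : Int) : ∀ (L : List (List (String × Int))) (s : Int) (n : Nat),
    m ≤ s + (L.map pvEspb).sum →
    ∃ c, (PySem.List.enumerate (s :: pvScan s L) (n : Int)).find? (fun ic => decide (m ≤ ic.2))
          = some (((n : Int) + (pvPickLoopA m L s).length, c)) := by
  intro L
  induction L with
  | nil =>
      intro s n h
      simp only [List.map_nil, List.sum_nil, add_zero] at h
      refine ⟨s, ?_⟩
      simp [pvScan, PySem.List.enumerate_cons, h, pvPickLoopA]
  | cons p t ih =>
      intro s n h
      by_cases hs : s ≥ m
      · refine ⟨s, ?_⟩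
        simp [PySem.List.enumerate_cons, hs, pvPickLoopA]
      · have h' : m ≤ (s + pvEspb p) + (t.map pvEspb).sum := by
          simp only [List.map_cons, List.sum_cons] at h; omega
        obtain ⟨c, hc⟩ := ih (s + pvEspb p) (n + 1) h'
        refine ⟨c, ?_⟩
        have hns : (decide (m ≤ s)) = false := by simpa using hs
        rw [show pvScan s (p :: t) = (s + pvEspb p) :: pvScan (s + pvEspb p) t from rfl]
        rw [PySem.List.enumerate_cons]
        simp only [List.find?_cons, hns]
        have : ((n : Int) + 1) = (((n + 1 : Nat)) : Int) := by push_cast; ring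
        rw [this, hc]
        simp only [pvPickLoopA, if_neg hs, List.length_cons]
        congr 2
        push_cast; ring

theorem pick_subjects_for_ects_main (pool : List (List (String × Int))) (min_sum : Int)
    (hpre : Pre_pick_subjects_for_ects pool min_sum) :
    pick_subjects_for_ects pool min_sum = pick_subjects_for_ects_alt pool min_sum := by
  obtain ⟨-, hsum⟩ := hpre
  unfold pick_subjects_for_ects pick_subjects_for_ects_alt
  set srt := PySem.List.sorted pool (fun x => -pvEspb x) false with hsrt
  have hperm : srt.Perm pool := PySem.List.sorted_perm ..
  have hsum' : min_sum ≤ 0 + (srt.map pvEspb).sum := by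
    rw [(hperm.map pvEspb).sum_eq]
    simp only [funext pvEspb_eq_lookup]
    omega
  obtain ⟨c, hc⟩ := pvFind_scan min_sum srt 0 0 hsum'
  have hpr : (srt.foldl (fun (st : List Int × Int) p => (st.1 ++ [st.2 + pvEspb p], st.2 + pvEspb p)) ([0], 0)).1
      = 0 :: pvScan 0 srt := pvFoldl_pr srt [0] 0
  simp only [hpr]
  simp only [Nat.cast_zero, zero_add] at hc
  rw [hc]
  simp only [PySem.List.slice_to_natCast]
  exact pvLoopA_take min_sum srt 0

-- ===== VERDICT (by name: the statement is the Claim_ definition above) =====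
theorem pick_subjects_for_ects_spec : Claim_equal_pick_subjects_for_ects := by
  intro pool min_sum _ hpre
  exact pick_subjects_for_ects_main pool min_sum hpre
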